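-- pv_equiv track=rewrite | github.com/Mgs25/Edabit_Challenges | posCount_negSum.py | sum_neg
-- ===== SOURCE A (Python) =====
-- def sum_neg(lst):
-- 	pos = []
-- 	neg = []
-- 	for number in lst:
-- 		if number > 0:
-- 			pos.append(number)
-- 		else:
-- 			neg.append(number)
-- 	if len(lst) != 0:
-- 		return [len(pos),sum(neg)]
-- 	else:
-- 		return []
-- ===== SOURCE B (Python) =====
-- def sum_neg(lst):
--     if not lst:
--         return []
--     s = sorted(lst)
--     k = 0
--     total = 0
--     while k < len(s) and s[k] <= 0:
--         total += s[k]
--         k += 1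
--     return [len(s) - k, total]
-- ===== Notes on version B (the rewrite author's own statement) =====
-- stated objective: alternative
-- what changed: B sorts the list first so all non-positives form a prefix, then scans only that prefix (stopping at the first positive) to get their sum and count, returning [n - k, total]; A instead splits the whole list into two materialized lists and applies len/sum.
import Mathlib
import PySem

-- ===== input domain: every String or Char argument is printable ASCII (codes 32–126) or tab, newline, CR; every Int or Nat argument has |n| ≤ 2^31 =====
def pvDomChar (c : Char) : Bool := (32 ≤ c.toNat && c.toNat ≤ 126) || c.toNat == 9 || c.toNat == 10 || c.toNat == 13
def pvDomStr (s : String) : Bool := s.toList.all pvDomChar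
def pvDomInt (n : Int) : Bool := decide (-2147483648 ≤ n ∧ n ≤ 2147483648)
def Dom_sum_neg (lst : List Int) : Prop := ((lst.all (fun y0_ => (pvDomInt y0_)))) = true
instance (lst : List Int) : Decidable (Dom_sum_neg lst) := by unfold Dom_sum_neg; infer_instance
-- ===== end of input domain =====

-- B sorts the list so the non-positives form a prefix, then scans just that prefix
-- (stopping at the first positive) for its sum and count; A splits the whole list
-- into two materialized lists and applies len/sum. Alternative algorithm, same results.

-- ===== PORT A =====
def sum_neg (lst : List Int) : List Int :=
  let pn := lst.foldl (fun (pn : List Int × List Int) number =>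
    if number > 0 then (pn.1 ++ [number], pn.2) else (pn.1, pn.2 ++ [number])) ([], [])
  if lst.length ≠ 0 then [(pn.1.length : Int), pn.2.sum] else []

-- ===== PORT B =====
-- the 'while k < len(s) and s[k] <= 0' loop of Source B: consume the ≤0 prefix,
-- returning (k, total); stops at the first element > 0
def sumNegScan : List Int → Int → Int → Int × Int
  | [], k, t => (k, t)
  | x :: xs, k, t => if x ≤ 0 then sumNegScan xs (k + 1) (t + x) else (k, t)

def sum_neg_alt (lst : List Int) : List Int :=
  if lst = [] then []
  else
    let s := PySem.List.sorted lst (fun x => x) false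
    let r := sumNegScan s 0 0
    [(s.length : Int) - r.1, r.2]

-- ===== PRECONDITION & SPEC =====
def Spec_sum_neg (lst : List Int) (out : List Int) : Prop := out = sum_neg_alt lst
instance (lst : List Int) (out : List Int) : Decidable (Spec_sum_neg lst out) := by unfold Spec_sum_neg; infer_instance

-- ===== CLAIM (what is proved, stated in full; the proofs are below) =====
def Claim_equal_sum_neg : Prop := ∀ (lst : List Int), Dom_sum_neg lst → Spec_sum_neg lst (sum_neg lst)

-- ===== LEMMAS AND PROOFS =====

-- A's loop builds exactly the two filtered sublists
theorem sum_neg_foldl_filter (lst p n : List Int) :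
    lst.foldl (fun (pn : List Int × List Int) number =>
      if number > 0 then (pn.1 ++ [number], pn.2) else (pn.1, pn.2 ++ [number])) (p, n)
    = (p ++ lst.filter (fun x => decide (0 < x)), n ++ lst.filter (fun x => decide (x ≤ 0))) := by
  induction lst generalizing p n with
  | nil => simp
  | cons x xs ih =>
    by_cases hx : 0 < x
    · have hx' : ¬ x ≤ 0 := by omega
      simp [hx, hx', ih]
    · have hx' : x ≤ 0 := by omega
      simp [hx, hx', ih]

-- B's prefix scan on a sorted list counts and sums all the ≤0 elements
theorem sumNegScan_sorted (s : List Int) (hs : s.Pairwise (· ≤ ·)) (k t : Int) :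
    sumNegScan s k t
    = (k + ((s.filter (fun x => decide (x ≤ 0))).length : Int),
       t + (s.filter (fun x => decide (x ≤ 0))).sum) := by
  induction s generalizing k t with
  | nil => simp [sumNegScan]
  | cons x xs ih =>
    rcases List.pairwise_cons.mp hs with ⟨hhead, htail⟩
    by_cases hx : x ≤ 0
    · have := ih htail (k + 1) (t + x)
      rw [show (List.filter (fun x => decide (x ≤ 0)) (x :: xs))
            = x :: List.filter (fun x => decide (x ≤ 0)) xs from
          List.filter_cons_of_pos (by simp [hx])]
      simp only [sumNegScan, hx, if_pos, this, List.length_cons, List.sum_cons, Prod.mk.injEq]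
      constructor
      · push_cast; ring
      · ring
    · have hnil : xs.filter (fun x => decide (x ≤ 0)) = [] := by
        apply List.filter_eq_nil_iff.mpr
        intro y hy
        have := hhead y hy
        simp
        omega
      simp [sumNegScan, hx, hnil]

-- the two filtered sublists partition the list
theorem sum_neg_filter_split (lst : List Int) :
    lst.length = (lst.filter (fun x => decide (0 < x))).length
      + (lst.filter (fun x => decide (x ≤ 0))).length := by
  induction lst with
  | nil => simp
  | cons y ys ih =>
    by_cases hy : 0 < y
    · have hy' : ¬ y ≤ 0 := by omega
      simp [hy, hy', ih]
      omega
    · have hy' : y ≤ 0 := by omega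
      simp [hy, hy', ih]
      omega

-- ===== VERDICT (by name: the statement is the Claim_ definition above) =====
theorem sum_neg_spec : Claim_equal_sum_neg := by
  intro lst _
  unfold Spec_sum_neg sum_neg sum_neg_alt
  by_cases h : lst = []
  · simp [h]
  · have hperm : (PySem.List.sorted lst (fun x => x) false).Perm lst :=
      PySem.List.sorted_perm lst (fun x => x) false
    have hpair : (PySem.List.sorted lst (fun x => x) false).Pairwise (fun a b => a ≤ b) :=
      PySem.List.sorted_pairwise lst (fun x => x)
    have hscan := sumNegScan_sorted (PySem.List.sorted lst (fun x => x) false) hpair 0 0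
    have hfold := sum_neg_foldl_filter lst [] []
    have hfle : ((PySem.List.sorted lst (fun x => x) false).filter (fun x => decide (x ≤ 0))).Perm
        (lst.filter (fun x => decide (x ≤ 0))) := hperm.filter _
    have hsplit := sum_neg_filter_split lst
    have hsumeq : ((PySem.List.sorted lst (fun x => x) false).filter (fun x => decide (x ≤ 0))).sum
        = (lst.filter (fun x => decide (x ≤ 0))).sum := hfle.sum_eq
    have hlf : ((PySem.List.sorted lst (fun x => x) false).filter (fun x => decide (x ≤ 0))).length
        = (lst.filter (fun x => decide (x ≤ 0))).length := hfle.length_eq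
    have hne : lst.length ≠ 0 := by simpa using h
    rw [hfold]
    simp only [h, ite_false, List.nil_append]
    rw [hscan, hlf]
    have h1 : ((lst.filter (fun x => decide (0 < x))).length : Int)
        = ((PySem.List.sorted lst (fun x => x) false).length : Int)
          - (0 + ((lst.filter (fun x => decide (x ≤ 0))).length : Int)) := by
      rw [hperm.length_eq, hsplit]; push_cast; ring
    rw [h1, hsumeq]
    simp [hne]
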